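-- pv_equiv track=rewrite | github.com/Labbeti/OWLL | src/util.py | split_op_name
-- ===== SOURCE A (Python) =====
-- def split_op_name(word: str) -> list:
--     """
--         Split an OP name in several words.
--         :param word: word to split, often an object property name.
--         :return: the list of subwords contained in word.
--     """
--     res = []
--     buf = ""
--     for chr_ in word:
--         if chr_.isupper():
--             if buf != "":
--                 res.append(buf)
--             buf = chr_
--         elif chr_ == "_" or chr_ == " " or chr_ == "-":
--             if buf != "":
--                 res.append(buf)
--             buf = ""
--         else:
--             buf += chr_
--     if buf != "":
--         res.append(buf)
--     return res
-- ===== SOURCE B (Python) =====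
-- import re
--
-- _WORD_RE = re.compile(r'[A-Z][^A-Z_ -]*|[^A-Z_ -]+')
--
-- def split_op_name(word: str) -> list:
--     # One regex scan: each token is an optional leading uppercase letter
--     # followed by non-uppercase/non-separator chars; '_', ' ', '-' are skipped.
--     return _WORD_RE.findall(word)
-- ===== Notes on version B (the rewrite author's own statement) =====
-- stated objective: idiomatic
-- what changed: Replaced the character-by-character buffer/accumulator loop with a single precompiled regex findall whose pattern extracts each token (optional leading uppercase plus following non-uppercase/non-separator characters) directly.
import Mathlib
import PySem

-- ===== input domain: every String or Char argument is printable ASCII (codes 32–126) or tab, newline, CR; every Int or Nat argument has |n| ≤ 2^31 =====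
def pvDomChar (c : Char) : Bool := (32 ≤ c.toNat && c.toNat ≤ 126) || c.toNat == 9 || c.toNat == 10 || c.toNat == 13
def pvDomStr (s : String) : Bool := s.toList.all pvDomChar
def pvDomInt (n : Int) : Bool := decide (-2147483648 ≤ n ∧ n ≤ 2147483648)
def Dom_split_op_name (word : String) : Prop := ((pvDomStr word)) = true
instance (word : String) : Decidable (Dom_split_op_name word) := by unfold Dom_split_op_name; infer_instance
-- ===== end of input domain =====

-- B replaces A's character-by-character buffer loop with a regex-style tokenizer
-- that extracts each whole token at once; objective: idiomatic, same cost.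

-- Python's chr.isupper(), exact on the stated ASCII domain (Dom_split_op_name).
def pvIsUp (c : Char) : Bool := 'A' ≤ c && c ≤ 'Z'
-- chr == '_' or chr == ' ' or chr == '-'
def pvIsSep (c : Char) : Bool := c == '_' || c == ' ' || c == '-'

-- ===== PORT A =====
-- A's for-loop over the characters with accumulators (res, buf), step for step.
def splitLoopA : List Char → List String → List Char → List String
  | [], res, buf => if buf ≠ [] then res ++ [String.ofList buf] else res
  | c :: cs, res, buf =>
    if pvIsUp c then
      splitLoopA cs (if buf ≠ [] then res ++ [String.ofList buf] else res) [c]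
    else if pvIsSep c then
      splitLoopA cs (if buf ≠ [] then res ++ [String.ofList buf] else res) []
    else
      splitLoopA cs res (buf ++ [c])

def split_op_name (word : String) : List String :=
  splitLoopA word.toList [] []

-- ===== PORT B =====
-- Hand-port of re.findall(r'[A-Z][^A-Z_ -]*|[^A-Z_ -]+', word): at each
-- position skip a separator, otherwise take the whole match (one char plus
-- the maximal following run of non-uppercase/non-separator chars) at once.
def pvIsBody (c : Char) : Bool := !pvIsUp c && !pvIsSep c

def splitScanB : List Char → List String
  | [] => []
  | c :: cs =>
    if pvIsSep c then splitScanB cs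
    else String.ofList (c :: cs.takeWhile pvIsBody) :: splitScanB (cs.dropWhile pvIsBody)
termination_by cs => cs.length
decreasing_by
  · simp
  · exact Nat.lt_succ_of_le (List.length_dropWhile_le _ _)

def split_op_name_alt (word : String) : List String :=
  splitScanB word.toList

-- ===== PRECONDITION & SPEC =====
def Spec_split_op_name (word : String) (out : List String) : Prop := out = split_op_name_alt word
instance (word : String) (out : List String) : Decidable (Spec_split_op_name word out) := by unfold Spec_split_op_name; infer_instance

-- ===== CLAIM (what is proved, stated in full; the proofs are below) =====
def Claim_equal_split_op_name : Prop := ∀ (word : String), Dom_split_op_name word → Spec_split_op_name word (split_op_name word)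

-- ===== LEMMAS AND PROOFS =====

-- the res accumulator only ever grows at the back
lemma splitLoopA_res (cs : List Char) : ∀ res buf,
    splitLoopA cs res buf = res ++ splitLoopA cs [] buf := by
  induction cs with
  | nil => intro res buf; by_cases h : buf = [] <;> simp [splitLoopA, h]
  | cons c cs ih =>
    intro res buf
    by_cases hu : pvIsUp c
    · by_cases h : buf = [] <;>
        simp [splitLoopA, hu, h, ih (res ++ [String.ofList buf]) [c], ih res [c],
              ih [String.ofList buf] [c]]
    · by_cases hs : pvIsSep c
      · by_cases h : buf = [] <;>
          simp [splitLoopA, hu, hs, h, ih (res ++ [String.ofList buf]) [],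
                ih res [], ih [String.ofList buf] []]
      · simp [splitLoopA, hu, hs, ih res (buf ++ [c])]

-- an uppercase letter is never one of the separators
lemma up_not_sep (c : Char) (hu : pvIsUp c = true) : pvIsSep c = false := by
  simp [pvIsUp] at hu
  simp [pvIsSep]
  refine ⟨⟨?_, ?_⟩, ?_⟩ <;> rintro rfl <;> revert hu <;> decide

-- A's loop from any state equals B's scanner: with an empty buffer they agree
-- outright; with a nonempty buffer the loop first finishes that token.
lemma splitLoopA_eq_scan (cs : List Char) :
    splitLoopA cs [] [] = splitScanB cs ∧
    ∀ buf, buf ≠ [] →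
      splitLoopA cs [] buf =
        String.ofList (buf ++ cs.takeWhile pvIsBody) :: splitScanB (cs.dropWhile pvIsBody) := by
  induction cs with
  | nil =>
    constructor
    · simp [splitLoopA, splitScanB]
    · intro buf h; simp [splitLoopA, splitScanB, h]
  | cons c cs ih =>
    constructor
    · by_cases hu : pvIsUp c
      · have hs := up_not_sep c hu
        have hb : pvIsBody c = false := by simp [pvIsBody, hu]
        simp [splitLoopA, splitScanB, hu, hs, ih.2 [c] (by simp)]
      · by_cases hs : pvIsSep c
        · simp [splitLoopA, splitScanB, hu, hs, ih.1]
        · have hb : pvIsBody c = true := by simp [pvIsBody, hu, hs]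
          simpa [splitLoopA, splitScanB, hu, hs, hb] using ih.2 [c] (by simp)
    · intro buf h
      by_cases hu : pvIsUp c
      · have hs := up_not_sep c hu
        have hb : pvIsBody c = false := by simp [pvIsBody, hu]
        rw [show splitLoopA (c :: cs) [] buf
              = splitLoopA cs [String.ofList buf] [c] by simp [splitLoopA, hu, h]]
        rw [splitLoopA_res cs [String.ofList buf] [c]]
        simp [hb, ih.2 [c] (by simp), splitScanB, hs]
      · by_cases hs : pvIsSep c
        · have hb : pvIsBody c = false := by simp [pvIsBody, hs]
          rw [show splitLoopA (c :: cs) [] buf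
                = splitLoopA cs [String.ofList buf] [] by simp [splitLoopA, hu, hs, h]]
          rw [splitLoopA_res cs [String.ofList buf] []]
          simp [hb, ih.1, splitScanB, hs]
        · have hb : pvIsBody c = true := by simp [pvIsBody, hu, hs]
          rw [show splitLoopA (c :: cs) [] buf
                = splitLoopA cs [] (buf ++ [c]) by simp [splitLoopA, hu, hs]]
          simp [hb, ih.2 (buf ++ [c]) (by simp)]

-- ===== VERDICT (by name: the statement is the Claim_ definition above) =====
theorem split_op_name_spec : Claim_equal_split_op_name := by
  intro word _
  unfold Spec_split_op_name split_op_name split_op_name_alt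
  exact (splitLoopA_eq_scan word.toList).1
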